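-- pv_equiv track=rewrite | github.com/yanmingyu92/csp-workflow-engine | csp-skills/layer-5-tfl/tfl-demographics/script.py | _group_by_treatment
-- ===== SOURCE A (Python) =====
-- from typing import Dict, List, Any
-- from collections import defaultdict
--
-- def _group_by_treatment(data: Dict) -> Dict[str, Dict]:
--     """Group data by treatment."""
--     groups = defaultdict(lambda: defaultdict(list))
--     n = len(data.get("USUBJID", []))
--     for i in range(n):
--         trt = (
--             data.get("TRT01P", [""] * (i + 1))[i]
--             if i < len(data.get("TRT01P", []))
--             else "Unknown"
--         )
--         for var, values in data.items():
--             groups[trt][var].append(values[i] if i < len(values) else "")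
--     return dict(groups)
-- ===== SOURCE B (Python) =====
-- from typing import Dict
-- from collections import defaultdict
--
-- def _group_by_treatment(data: Dict) -> Dict[str, Dict]:
--     """Group data by treatment: bucket row indices per treatment first, then
--     build each treatment's columns in one comprehension per variable."""
--     trt01p = data.get("TRT01P", [])
--     n = len(data.get("USUBJID", []))
--     buckets = {}  # treatment -> row indices, in first-appearance order
--     for i in range(n):
--         trt = trt01p[i] if i < len(trt01p) else "Unknown"
--         buckets.setdefault(trt, []).append(i)
--     result = {}
--     for trt, idxs in buckets.items():
--         inner = defaultdict(list)
--         for var, values in data.items():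
--             inner[var] = [values[i] if i < len(values) else "" for i in idxs]
--         result[trt] = inner
--     return result
-- ===== Notes on version B (the rewrite author's own statement) =====
-- stated objective: alternative
-- what changed: Instead of A's single incremental loop that appends one cell at a time into nested defaultdicts, B first buckets the row indices per treatment in one pass and then builds each treatment's columns with one list comprehension per variable.
import Mathlib
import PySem

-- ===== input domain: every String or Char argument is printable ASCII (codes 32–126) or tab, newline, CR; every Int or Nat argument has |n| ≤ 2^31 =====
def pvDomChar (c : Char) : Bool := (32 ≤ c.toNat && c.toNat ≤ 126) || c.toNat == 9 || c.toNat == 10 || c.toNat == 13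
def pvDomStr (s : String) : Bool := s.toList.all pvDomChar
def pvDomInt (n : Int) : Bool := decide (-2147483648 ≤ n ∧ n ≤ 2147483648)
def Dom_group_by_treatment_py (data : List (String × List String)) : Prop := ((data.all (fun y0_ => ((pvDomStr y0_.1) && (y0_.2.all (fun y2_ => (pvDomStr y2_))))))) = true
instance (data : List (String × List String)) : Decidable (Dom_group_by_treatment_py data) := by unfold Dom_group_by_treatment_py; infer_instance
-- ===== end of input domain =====

-- B replaces A's row-by-row nested appending by a two-phase pass: bucket row indices per
-- treatment once, then build each column with one map per (treatment, variable) pair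
-- (objective: alternative decomposition, same asymptotic cost).

-- ===== PORT A =====
-- Port of A's `_group_by_treatment`.  The dict argument arrives as an association list and is
-- read through PySem.Dict.ofList (Python dict construction: last value wins, first position kept).
-- `range(n)` is ported as List.range n (n = a length, so all indices are the naturals 0..n-1), and
-- `data.get("TRT01P", [""]*(i+1))[i]` is only evaluated under the guard `i < len(...)`, so the
-- in-range indexing is List.getD (exact: the default list is unreachable).
def group_by_treatment_py (data : List (String × List String)) : List (String × List (String × List String)) :=
  let d := PySem.Dict.ofList data
  let n := (d.getD "USUBJID" []).length
  let groups : PySem.Dict String (PySem.Dict String (List String)) :=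
    (List.range n).foldl (fun groups i =>
      let T := d.getD "TRT01P" []
      let trt := if i < T.length then T.getD i "" else "Unknown"
      d.items.foldl (fun groups q =>
        let inner := groups.getD trt PySem.Dict.empty
        groups.insert trt
          (inner.insert q.1 (inner.getD q.1 [] ++ [if i < q.2.length then q.2.getD i "" else ""])))
        groups)
      PySem.Dict.empty
  groups.items.map (fun p => (p.1, p.2.items))

-- ===== PORT B =====
-- Port of B (Source B): phase 1 buckets the row indices per treatment (setdefault(trt, []).append(i),
-- i.e. store back the old bucket extended by i); phase 2 builds, for each bucket and each
-- variable of the data dict, the whole column by one map over the bucket's indices.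
def group_by_treatment_py_alt (data : List (String × List String)) : List (String × List (String × List String)) :=
  let d := PySem.Dict.ofList data
  let T := d.getD "TRT01P" []
  let n := (d.getD "USUBJID" []).length
  let buckets : PySem.Dict String (List Nat) :=
    (List.range n).foldl (fun b i =>
      let trt := if i < T.length then T.getD i "" else "Unknown"
      b.insert trt (b.getD trt [] ++ [i]))
      PySem.Dict.empty
  buckets.items.map (fun p =>
    (p.1,
      (d.items.foldl (fun (inner : PySem.Dict String (List String)) q =>
          inner.insert q.1 (p.2.map (fun i => if i < q.2.length then q.2.getD i "" else "")))
        PySem.Dict.empty).items))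

-- ===== PRECONDITION & SPEC =====
def Spec_group_by_treatment_py (data : List (String × List String)) (out : List (String × List (String × List String))) : Prop := out = group_by_treatment_py_alt data
instance (data : List (String × List String)) (out : List (String × List (String × List String))) : Decidable (Spec_group_by_treatment_py data out) := by unfold Spec_group_by_treatment_py; infer_instance

-- ===== CLAIM (what is proved, stated in full; the proofs are below) =====
def Claim_equal_group_by_treatment_py : Prop := ∀ (data : List (String × List String)), Dom_group_by_treatment_py data → Spec_group_by_treatment_py data (group_by_treatment_py data)


-- ===== LEMMAS AND PROOFS =====

theorem pv_foldl_insert_factor {κ ν α : Type} [BEq κ] [LawfulBEq κ]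
    (L : List α) (hL : L ≠ []) (S : PySem.Dict κ ν) (k : κ) (dflt : ν) (G : ν → α → ν) :
    L.foldl (fun S q => S.insert k (G (S.getD k dflt) q)) S
      = S.insert k (L.foldl G (S.getD k dflt)) := by
  induction L generalizing S with
  | nil => exact absurd rfl hL
  | cons a tl ih =>
    cases tl with
    | nil => simp
    | cons b tl' =>
      rw [List.foldl_cons, ih (by simp)]
      rw [PySem.Dict.getD_insert_self, PySem.Dict.insert_insert_self]
      simp

theorem pv_get?_absent {κ ν : Type} [BEq κ] [LawfulBEq κ] (A : List (κ × ν)) (k : κ)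
    (h : ∀ a ∈ A, ¬ a.1 = k) :
    (PySem.Dict.mk A).get? k = none := by
  simp only [PySem.Dict.get?]
  have : A.find? (fun p => p.1 == k) = none := by
    simp only [List.find?_eq_none]
    intro a ha; simpa using h a ha
  rw [this]; rfl

theorem pv_insert_absent {κ ν : Type} [BEq κ] [LawfulBEq κ] (A : List (κ × ν)) (k : κ) (v : ν)
    (h : ∀ a ∈ A, ¬ a.1 = k) :
    (PySem.Dict.mk A).insert k v = PySem.Dict.mk (A ++ [(k, v)]) := by
  simp only [PySem.Dict.insert, PySem.Dict.contains]
  have : A.any (fun p => p.1 == k) = false := by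
    simp only [List.any_eq_false]
    intro a ha; simpa using h a ha
  rw [this]; simp

theorem pv_get?_middle {κ ν : Type} [BEq κ] [LawfulBEq κ] (A rest : List (κ × ν)) (k : κ) (c : ν)
    (hA : ∀ a ∈ A, ¬ a.1 = k) :
    (PySem.Dict.mk (A ++ (k, c) :: rest)).get? k = some c := by
  simp only [PySem.Dict.get?, List.find?_append]
  have h1 : A.find? (fun p => p.1 == k) = none := by
    simp only [List.find?_eq_none]; intro a ha; simpa using hA a ha
  rw [h1]
  simp

theorem pv_insert_middle {κ ν : Type} [BEq κ] [LawfulBEq κ] (A rest : List (κ × ν)) (k : κ) (c v : ν)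
    (hA : ∀ a ∈ A, ¬ a.1 = k) (hrest : ∀ a ∈ rest, ¬ a.1 = k) :
    (PySem.Dict.mk (A ++ (k, c) :: rest)).insert k v = PySem.Dict.mk (A ++ (k, v) :: rest) := by
  have hmap : ∀ (M : List (κ × ν)), (∀ a ∈ M, ¬ a.1 = k) →
      M.map (fun p => if (p.1 == k) = true then (k, v) else p) = M := by
    intro M hM
    have h2 : M.map (fun p => if (p.1 == k) = true then (k, v) else p) = M.map id :=
      List.map_congr_left (by intro a ha; simp [hM a ha])
    simpa using h2
  simp only [PySem.Dict.insert, PySem.Dict.contains]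
  have : (A ++ (k, c) :: rest).any (fun p => p.1 == k) = true := by simp
  rw [this]
  simp only [List.map_append, List.map_cons, beq_self_eq_true, if_pos]
  rw [hmap A hA, hmap rest hrest]

theorem pv_foldl_extend_keys {κ σ τ : Type} [BEq κ] [LawfulBEq κ]
    (L : List (κ × σ)) (A : List (κ × List τ)) (g : κ × σ → List τ) (f : κ × σ → τ)
    (hnd : (L.map Prod.fst).Nodup) (hdisj : ∀ q ∈ L, ∀ a ∈ A, ¬ a.1 = q.1) :
    L.foldl (fun inner q => inner.insert q.1 (inner.getD q.1 [] ++ [f q]))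
        (PySem.Dict.mk (A ++ L.map (fun q => (q.1, g q))))
      = PySem.Dict.mk (A ++ L.map (fun q => (q.1, g q ++ [f q]))) := by
  induction L generalizing A with
  | nil => simp
  | cons q tl ih =>
    have hAq : ∀ a ∈ A, ¬ a.1 = q.1 := fun a ha => hdisj q (by simp) a ha
    have htlq : ∀ a ∈ (tl.map (fun q => (q.1, g q))), ¬ a.1 = q.1 := by
      intro a ha
      obtain ⟨q', hq', rfl⟩ := List.mem_map.mp ha
      intro h
      exact (List.nodup_cons.mp hnd).1 (h ▸ List.mem_map_of_mem hq')
    rw [List.foldl_cons]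
    have hget : (PySem.Dict.mk (A ++ (q.1, g q) :: tl.map (fun q => (q.1, g q)))).getD q.1 [] = g q := by
      rw [PySem.Dict.getD_eq_get?_getD, pv_get?_middle _ _ _ _ hAq]; rfl
    simp only [List.map_cons]
    rw [hget, pv_insert_middle _ _ _ _ _ hAq htlq]
    have hassoc : A ++ (q.1, g q ++ [f q]) :: tl.map (fun q => (q.1, g q))
        = (A ++ [(q.1, g q ++ [f q])]) ++ tl.map (fun q => (q.1, g q)) := by simp
    rw [hassoc]
    rw [ih _ (List.nodup_cons.mp hnd).2 ?hd]
    · simp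
    case hd =>
      intro q' hq' a ha
      rcases List.mem_append.mp ha with h1 | h1
      · exact hdisj q' (by simp [hq']) a h1
      · simp only [List.mem_singleton] at h1
        subst h1
        intro h
        exact (List.nodup_cons.mp hnd).1 (h ▸ List.mem_map_of_mem hq')

theorem pv_foldl_fresh_keys {κ σ τ : Type} [BEq κ] [LawfulBEq κ]
    (L : List (κ × σ)) (A : List (κ × List τ)) (f : κ × σ → τ)
    (hnd : (L.map Prod.fst).Nodup) (hdisj : ∀ q ∈ L, ∀ a ∈ A, ¬ a.1 = q.1) :
    L.foldl (fun inner q => inner.insert q.1 (inner.getD q.1 [] ++ [f q])) (PySem.Dict.mk A)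
      = PySem.Dict.mk (A ++ L.map (fun q => (q.1, [f q]))) := by
  induction L generalizing A with
  | nil => simp
  | cons q tl ih =>
    have hAq : ∀ a ∈ A, ¬ a.1 = q.1 := fun a ha => hdisj q (by simp) a ha
    rw [List.foldl_cons]
    have hget : (PySem.Dict.mk A).getD q.1 [] = [] := by
      rw [PySem.Dict.getD_eq_get?_getD, pv_get?_absent _ _ hAq]; rfl
    rw [hget, pv_insert_absent _ _ _ hAq]
    rw [ih _ (List.nodup_cons.mp hnd).2 ?hd]
    · simp
    case hd =>
      intro q' hq' a ha
      rcases List.mem_append.mp ha with h1 | h1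
      · exact hdisj q' (by simp [hq']) a h1
      · simp only [List.mem_singleton] at h1
        subst h1
        intro h
        exact (List.nodup_cons.mp hnd).1 (h ▸ List.mem_map_of_mem hq')

theorem pv_cols_build {κ σ τ : Type} [BEq κ] [LawfulBEq κ]
    (L : List (κ × σ)) (w : κ × σ → List τ) (hnd : (L.map Prod.fst).Nodup) :
    L.foldl (fun (inner : PySem.Dict κ (List τ)) q => inner.insert q.1 (w q)) PySem.Dict.empty
      = PySem.Dict.mk (L.map (fun q => (q.1, w q))) := by
  apply PySem.Dict.ext
  have := PySem.Dict.items_foldl_insert_fresh L (fun q => q.1) w PySem.Dict.empty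
    (by intro a _; exact PySem.Dict.contains_empty _) hnd
  simpa [PySem.Dict.empty] using this

theorem pv_mapval_insert {κ ν μ : Type} [BEq κ] [LawfulBEq κ] (l : List (κ × ν)) (F : ν → μ) (k : κ) (v : ν) :
    (PySem.Dict.mk (l.map (fun p => (p.1, F p.2)))).insert k (F v)
      = PySem.Dict.mk (((PySem.Dict.mk l).insert k v).items.map (fun p => (p.1, F p.2))) := by
  simp only [PySem.Dict.insert, PySem.Dict.contains]
  have hany : ((l.map (fun p => (p.1, F p.2))).any (fun p => p.1 == k)) = l.any (fun p => p.1 == k) := by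
    simp [List.any_map]; rfl
  rw [hany]
  split
  · congr 1
    simp only [List.map_map]
    apply List.map_congr_left
    intro a _
    by_cases h : a.1 = k <;> simp [Function.comp, h]
  · simp

theorem pv_mapval_get? {κ ν μ : Type} [BEq κ] [LawfulBEq κ] (l : List (κ × ν)) (F : ν → μ) (k : κ) :
    (PySem.Dict.mk (l.map (fun p => (p.1, F p.2)))).get? k
      = ((PySem.Dict.mk l).get? k).map F := by
  simp only [PySem.Dict.get?, List.find?_map]
  have : ((fun p : κ × μ => p.1 == k) ∘ (fun p : κ × ν => (p.1, F p.2))) = fun p : κ × ν => p.1 == k := rfl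
  rw [this]
  cases List.find? (fun p : κ × ν => p.1 == k) l <;> simp

-- One A-row step, on a state that is the value-mapped image of the bucket dict b.
theorem pv_step (L : List (String × List String)) (hnd : (L.map Prod.fst).Nodup) (hne : L ≠ [])
    (trt : String) (i : Nat) (b : PySem.Dict String (List Nat)) :
    L.foldl (fun (groups : PySem.Dict String (PySem.Dict String (List String))) q =>
        let inner := groups.getD trt PySem.Dict.empty
        groups.insert trt
          (inner.insert q.1 (inner.getD q.1 [] ++ [if i < q.2.length then q.2.getD i "" else ""])))
      (PySem.Dict.mk (b.items.map (fun p => (p.1, PySem.Dict.mk (L.map (fun q =>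
        (q.1, p.2.map (fun j => if j < q.2.length then q.2.getD j "" else ""))))))))
    = PySem.Dict.mk ((b.insert trt (b.getD trt [] ++ [i])).items.map (fun p =>
        (p.1, PySem.Dict.mk (L.map (fun q =>
          (q.1, p.2.map (fun j => if j < q.2.length then q.2.getD j "" else ""))))))) := by
  set F : List Nat → PySem.Dict String (List String) := fun idxs =>
    PySem.Dict.mk (L.map (fun q =>
      (q.1, idxs.map (fun j => if j < q.2.length then q.2.getD j "" else "")))) with hF
  have hfac := pv_foldl_insert_factor L hne
    (PySem.Dict.mk (b.items.map (fun p => (p.1, F p.2)))) trt PySem.Dict.empty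
    (fun inner q => inner.insert q.1 (inner.getD q.1 [] ++ [if i < q.2.length then q.2.getD i "" else ""]))
  simp only [] at hfac
  rw [hfac]
  have hget : (PySem.Dict.mk (b.items.map (fun p => (p.1, F p.2)))).get? trt = (b.get? trt).map F := by
    have := pv_mapval_get? b.items F trt
    simpa using this
  cases hb : b.get? trt with
  | none =>
    have hgd : (PySem.Dict.mk (b.items.map (fun p => (p.1, F p.2)))).getD trt PySem.Dict.empty
        = PySem.Dict.empty := by
      rw [PySem.Dict.getD_eq_get?_getD, hget, hb]; rfl
    rw [hgd]
    have hfold := pv_foldl_fresh_keys L []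
      (fun q => if i < q.2.length then q.2.getD i "" else "") hnd (by simp)
    have hfold' : L.foldl (fun inner q => inner.insert q.1
        (inner.getD q.1 [] ++ [if i < q.2.length then q.2.getD i "" else ""])) PySem.Dict.empty
        = F [i] := by
      rw [hF]; simpa using hfold
    rw [hfold']
    have hbgd : b.getD trt [] = [] := by rw [PySem.Dict.getD_eq_get?_getD, hb]; rfl
    rw [hbgd]
    have := pv_mapval_insert b.items F trt [i]
    simpa using this
  | some w =>
    have hgd : (PySem.Dict.mk (b.items.map (fun p => (p.1, F p.2)))).getD trt PySem.Dict.empty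
        = F w := by
      rw [PySem.Dict.getD_eq_get?_getD, hget, hb]; rfl
    rw [hgd]
    have hfold := pv_foldl_extend_keys L []
      (fun q => w.map (fun j => if j < q.2.length then q.2.getD j "" else ""))
      (fun q => if i < q.2.length then q.2.getD i "" else "") hnd (by simp)
    have hfold' : L.foldl (fun inner q => inner.insert q.1
        (inner.getD q.1 [] ++ [if i < q.2.length then q.2.getD i "" else ""])) (F w)
        = F (w ++ [i]) := by
      rw [hF]; simpa using hfold
    rw [hfold']
    have hbgd : b.getD trt [] = w := by rw [PySem.Dict.getD_eq_get?_getD, hb]; rfl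
    rw [hbgd]
    have := pv_mapval_insert b.items F trt (w ++ [i])
    simpa using this

theorem pv_outer_inv (L : List (String × List String)) (trtOf : Nat → String)
    (hnd : (L.map Prod.fst).Nodup) (hne : L ≠ []) (l : List Nat) :
    l.foldl (fun groups i =>
        L.foldl (fun (groups : PySem.Dict String (PySem.Dict String (List String))) q =>
          let inner := groups.getD (trtOf i) PySem.Dict.empty
          groups.insert (trtOf i)
            (inner.insert q.1 (inner.getD q.1 [] ++ [if i < q.2.length then q.2.getD i "" else ""])))
          groups)
      PySem.Dict.empty
    = PySem.Dict.mk
        ((l.foldl (fun (b : PySem.Dict String (List Nat)) i =>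
            b.insert (trtOf i) (b.getD (trtOf i) [] ++ [i])) PySem.Dict.empty).items.map
          (fun p => (p.1, PySem.Dict.mk (L.map (fun q =>
            (q.1, p.2.map (fun i => if i < q.2.length then q.2.getD i "" else ""))))))) := by
  induction l using List.reverseRecOn with
  | nil => rfl
  | append_singleton l i ih =>
    rw [List.foldl_append, List.foldl_append]
    simp only [List.foldl_cons, List.foldl_nil]
    rw [ih]
    exact pv_step L hnd hne (trtOf i) i _

theorem pv_cols_build_items {κ σ τ : Type} [BEq κ] [LawfulBEq κ]
    (L : List (κ × σ)) (hnd : (L.map Prod.fst).Nodup) (w : κ × σ → List τ) :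
    (L.foldl (fun (inner : PySem.Dict κ (List τ)) q => inner.insert q.1 (w q)) PySem.Dict.empty).items
      = L.map (fun q => (q.1, w q)) := by
  rw [pv_cols_build L w hnd]

-- ===== VERDICT (by name: the statement is the Claim_ definition above) =====
theorem group_by_treatment_py_spec : Claim_equal_group_by_treatment_py := by
  intro data _
  unfold Spec_group_by_treatment_py
  simp only [group_by_treatment_py, group_by_treatment_py_alt]
  by_cases h0 : ((PySem.Dict.ofList data).getD "USUBJID" []).length = 0
  · rw [h0]
    rfl
  · have hnd : ((PySem.Dict.ofList data).items.map Prod.fst).Nodup := by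
      have := PySem.Dict.nodup_keys_ofList data
      simpa [PySem.Dict.keys] using this
    have hne : (PySem.Dict.ofList data).items ≠ [] := by
      intro hL
      apply h0
      rw [PySem.Dict.getD_eq_get?_getD]
      simp [PySem.Dict.get?, hL]
    have hinv := pv_outer_inv (PySem.Dict.ofList data).items
      (fun i => if i < ((PySem.Dict.ofList data).getD "TRT01P" []).length
        then ((PySem.Dict.ofList data).getD "TRT01P" []).getD i "" else "Unknown")
      hnd hne (List.range ((PySem.Dict.ofList data).getD "USUBJID" []).length)
    simp only [] at hinv
    rw [hinv]
    simp only [pv_cols_build_items (PySem.Dict.ofList data).items hnd, List.map_map]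
    rfl
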